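-- pv_equiv track=rewrite | github.com/woojaeoh/boj | 프로그래머스/1/82612. 부족한 금액 계산하기/부족한 금액 계산하기.py | solution
-- ===== SOURCE A (Python) =====
-- def solution(price, money, count):
--     answer = -1
--     result=0
--     for i in range(1, count+1):
--         result+= price*i
--
--     answer=result-money
--
--     if answer<0:
--         answer=0
--
--     return answer
-- ===== SOURCE B (Python) =====
-- def solution(price, money, count):
--     total = price * count * (count + 1) // 2 if count > 0 else 0
--     return max(total - money, 0)
-- ===== Notes on version B (the rewrite author's own statement) =====
-- stated objective: faster
-- what changed: Replaces the O(count) summation loop with the closed-form arithmetic series price*count*(count+1)//2 and a max with 0.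
import Mathlib
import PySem

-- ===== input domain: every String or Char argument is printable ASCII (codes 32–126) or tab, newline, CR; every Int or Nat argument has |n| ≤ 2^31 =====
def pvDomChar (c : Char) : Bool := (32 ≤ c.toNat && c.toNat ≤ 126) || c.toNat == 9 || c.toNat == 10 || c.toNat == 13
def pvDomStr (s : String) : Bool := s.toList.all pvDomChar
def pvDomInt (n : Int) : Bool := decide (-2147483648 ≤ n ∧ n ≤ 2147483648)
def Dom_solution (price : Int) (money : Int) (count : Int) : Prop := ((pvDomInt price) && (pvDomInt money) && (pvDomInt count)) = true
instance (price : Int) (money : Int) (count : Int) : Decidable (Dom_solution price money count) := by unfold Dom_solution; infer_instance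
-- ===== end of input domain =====

-- B replaces A's O(count) summation loop with the closed-form series price*count*(count+1)//2 (faster, O(1)).

-- ===== PORT A =====
def solution (price : Int) (money : Int) (count : Int) : Int :=
  let _answer : Int := -1
  let result : Int := (PySem.List.pyRange 1 (count + 1) 1).foldl (fun r i => r + price * i) 0
  let answer := result - money
  if answer < 0 then 0 else answer

-- ===== PORT B =====
def solution_alt (price : Int) (money : Int) (count : Int) : Int :=
  let total : Int := if count > 0 then PySem.Int.floordiv (price * count * (count + 1)) 2 else 0
  max (total - money) 0

-- ===== PRECONDITION & SPEC =====
def Spec_solution (price : Int) (money : Int) (count : Int) (out : Int) : Prop := out = solution_alt price money count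
instance (price : Int) (money : Int) (count : Int) (out : Int) : Decidable (Spec_solution price money count out) := by unfold Spec_solution; infer_instance

-- ===== CLAIM (what is proved, stated in full; the proofs are below) =====
def Claim_equal_solution : Prop := ∀ (price : Int) (money : Int) (count : Int), Dom_solution price money count → Spec_solution price money count (solution price money count)

-- ===== LEMMAS AND PROOFS =====

-- Twice the loop's accumulated sum over 1..n equals p*n*(n+1).
theorem pv_loop_sum (p : Int) : ∀ (n : Nat),
    2 * ((PySem.List.pyRange 1 ((n : Int) + 1) 1).foldl (fun r i => r + p * i) 0) = p * n * (n + 1) := by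
  intro n
  induction n with
  | zero =>
    rw [show ((0 : Nat) : Int) + 1 = 1 by norm_num, PySem.List.pyRange_one_eq_nil le_rfl]
    simp
  | succ k ih =>
    have h : (PySem.List.pyRange 1 (((k + 1 : Nat) : Int) + 1) 1)
        = PySem.List.pyRange 1 ((k : Int) + 1) 1 ++ [(k : Int) + 1] := by
      push_cast
      exact PySem.List.pyRange_one_succ_right (a := 1) (b := (k : Int) + 1) (by omega)
    rw [h, List.foldl_append]
    simp only [List.foldl]
    push_cast
    push_cast at ih
    ring_nf
    ring_nf at ih
    omega

theorem solution_eq_alt (price money count : Int) :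
    solution price money count = solution_alt price money count := by
  dsimp only [solution, solution_alt]
  by_cases hc : 0 < count
  · have hn : count = ((count.toNat : Nat) : Int) := by omega
    have h2 := pv_loop_sum price count.toNat
    rw [← hn] at h2
    have hfd : PySem.Int.floordiv (price * count * (count + 1)) 2
        = (PySem.List.pyRange 1 (count + 1) 1).foldl (fun r i => r + price * i) 0 := by
      rw [← h2, PySem.Int.floordiv_eq_ediv_of_pos (by omega)]
      exact Int.mul_ediv_cancel_left _ (by omega)
    rw [if_pos hc, hfd]
    split_ifs <;> omega
  · have hnil : PySem.List.pyRange 1 (count + 1) 1 = [] :=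
      PySem.List.pyRange_one_eq_nil (by omega)
    rw [hnil, if_neg hc]
    simp only [List.foldl_nil]
    split_ifs <;> omega

-- ===== VERDICT (by name: the statement is the Claim_ definition above) =====
theorem solution_spec : Claim_equal_solution := by
  intro price money count _
  unfold Spec_solution
  exact solution_eq_alt price money count
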